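-- pv_equiv track=rewrite | github.com/vjiayreddy24/symptoms_checker | main.py | _department_disorder_from_tests
-- ===== SOURCE A (Python) =====
-- from typing import List, Optional, Union
--
-- DISORDER_MAPPING = {
--     "AQ-10": "Autism Spectrum Disorder",
--     "ASRS": "ADHD",
--     "GAD-7": "Anxiety",
--     "PHQ-9": "Depression",
--     "Y-BOCS": "OCD",
--     "PCL-5": "PTSD",
--     "AUDIT": "Alcohol Use Disorder",
--     "DAST": "Drug Use Disorder",
--     "Mood Disorder Questionnaire": "Bipolar Disorder",
--     "MSI-BPD": "BPD",
--     "EAT-26": "Eating Disorders",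
-- }
--
-- def _department_disorder_from_tests(test_results: dict) -> Optional[dict]:
--     """Use your logic: severe → Psychiatry + that disorder; else Psychology."""
--     if not test_results:
--         return None
--     # Prioritize "severe"
--     for code, severity in test_results.items():
--         if str(severity).strip().lower() == "severe" and code in DISORDER_MAPPING:
--             return {"department": "Psychiatry", "disorder": DISORDER_MAPPING[code], "stage": "Severe"}
--     # Otherwise collect mapped disorders and default Psychology
--     mapped = [DISORDER_MAPPING[code] for code in test_results if code in DISORDER_MAPPING]
--     if mapped:
--         return {"department": "Psychology", "disorder": mapped[0], "stage": "Mild/Moderate"}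
--     return None
-- ===== SOURCE B (Python) =====
-- DISORDER_MAPPING = {
--     "AQ-10": "Autism Spectrum Disorder",
--     "ASRS": "ADHD",
--     "GAD-7": "Anxiety",
--     "PHQ-9": "Depression",
--     "Y-BOCS": "OCD",
--     "PCL-5": "PTSD",
--     "AUDIT": "Alcohol Use Disorder",
--     "DAST": "Drug Use Disorder",
--     "Mood Disorder Questionnaire": "Bipolar Disorder",
--     "MSI-BPD": "BPD",
--     "EAT-26": "Eating Disorders",
-- }
--
-- def _department_disorder_from_tests(test_results):
--     if not test_results:
--         return None
--     first_mapped = None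
--     for code, severity in test_results.items():
--         disorder = DISORDER_MAPPING.get(code)
--         if disorder is None:
--             continue
--         if str(severity).strip().lower() == "severe":
--             return {"department": "Psychiatry", "disorder": disorder, "stage": "Severe"}
--         if first_mapped is None:
--             first_mapped = disorder
--     if first_mapped is not None:
--         return {"department": "Psychology", "disorder": first_mapped, "stage": "Mild/Moderate"}
--     return None
-- ===== Notes on version B (the rewrite author's own statement) =====
-- stated objective: simpler
-- what changed: One single pass that returns Psychiatry immediately at the first severe mapped code while tracking the first mapped disorder, replacing A's two separate scans (the severe-scan plus the full mapped-list comprehension).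
import Mathlib
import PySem

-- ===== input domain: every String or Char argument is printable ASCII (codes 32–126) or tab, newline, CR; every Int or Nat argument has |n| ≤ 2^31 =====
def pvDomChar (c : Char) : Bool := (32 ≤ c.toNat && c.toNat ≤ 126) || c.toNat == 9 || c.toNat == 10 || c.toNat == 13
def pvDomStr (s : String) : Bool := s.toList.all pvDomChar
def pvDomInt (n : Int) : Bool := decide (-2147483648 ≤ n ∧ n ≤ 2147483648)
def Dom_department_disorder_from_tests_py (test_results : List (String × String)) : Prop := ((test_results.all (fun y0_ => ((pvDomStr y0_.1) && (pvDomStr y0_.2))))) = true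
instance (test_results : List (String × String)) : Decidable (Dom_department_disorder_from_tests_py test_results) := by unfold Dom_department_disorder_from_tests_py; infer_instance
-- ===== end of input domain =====

-- B replaces A's two separate scans (severe-scan, then mapped-list comprehension) with one pass tracking the first mapped disorder; objective: simpler.


-- ===== PORT A =====
def DISORDER_MAPPING : PySem.Dict String String :=
  PySem.Dict.ofList [("AQ-10", "Autism Spectrum Disorder"), ("ASRS", "ADHD"), ("GAD-7", "Anxiety"),
   ("PHQ-9", "Depression"), ("Y-BOCS", "OCD"), ("PCL-5", "PTSD"),
   ("AUDIT", "Alcohol Use Disorder"), ("DAST", "Drug Use Disorder"),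
   ("Mood Disorder Questionnaire", "Bipolar Disorder"), ("MSI-BPD", "BPD"),
   ("EAT-26", "Eating Disorders")]

-- A's first loop: return Psychiatry at the first severe mapped code
def aSevereLoop : List (String × String) → Option (List (String × String))
  | [] => none
  | (code, severity) :: rest =>
    if (PySem.Str.lower (PySem.Str.strip severity) == "severe")
        && (PySem.Dict.get? DISORDER_MAPPING code).isSome then
      some [("department", "Psychiatry"),
            ("disorder", (PySem.Dict.get? DISORDER_MAPPING code).getD ""),
            ("stage", "Severe")]
    else aSevereLoop rest

def department_disorder_from_tests_py (test_results : List (String × String)) : Option (List (String × String)) :=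
  if test_results = [] then none
  else
    match aSevereLoop test_results with
    | some r => some r
    | none =>
      -- mapped = [DISORDER_MAPPING[code] for code in test_results if code in DISORDER_MAPPING]
      match test_results.filterMap (fun p => PySem.Dict.get? DISORDER_MAPPING p.1) with
      | [] => none
      | d :: _ => some [("department", "Psychology"), ("disorder", d), ("stage", "Mild/Moderate")]

-- ===== PORT B =====
-- single pass carrying first_mapped
def bLoop : List (String × String) → Option String → Option (List (String × String))
  | [], first_mapped =>
    match first_mapped with
    | some d => some [("department", "Psychology"), ("disorder", d), ("stage", "Mild/Moderate")]
    | none => none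
  | (code, severity) :: rest, first_mapped =>
    match PySem.Dict.get? DISORDER_MAPPING code with
    | none => bLoop rest first_mapped
    | some disorder =>
      if PySem.Str.lower (PySem.Str.strip severity) == "severe" then
        some [("department", "Psychiatry"), ("disorder", disorder), ("stage", "Severe")]
      else bLoop rest (match first_mapped with | none => some disorder | some x => some x)

def department_disorder_from_tests_py_alt (test_results : List (String × String)) : Option (List (String × String)) :=
  if test_results = [] then none
  else bLoop test_results none

-- ===== PRECONDITION & SPEC =====
def Spec_department_disorder_from_tests_py (test_results : List (String × String)) (out : Option (List (String × String))) : Prop := out = department_disorder_from_tests_py_alt test_results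
instance (test_results : List (String × String)) (out : Option (List (String × String))) : Decidable (Spec_department_disorder_from_tests_py test_results out) := by unfold Spec_department_disorder_from_tests_py; infer_instance

-- ===== CLAIM (what is proved, stated in full; the proofs are below) =====
def Claim_equal_department_disorder_from_tests_py : Prop := ∀ (test_results : List (String × String)), Dom_department_disorder_from_tests_py test_results → Spec_department_disorder_from_tests_py test_results (department_disorder_from_tests_py test_results)

-- ===== LEMMAS AND PROOFS =====

def psychology (d : String) : List (String × String) :=
  [("department", "Psychology"), ("disorder", d), ("stage", "Mild/Moderate")]

theorem bLoop_eq (tr : List (String × String)) (fm : Option String) :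
    bLoop tr fm =
      match aSevereLoop tr with
      | some r => some r
      | none =>
        match fm with
        | some d => some (psychology d)
        | none =>
          match tr.filterMap (fun p => PySem.Dict.get? DISORDER_MAPPING p.1) with
          | [] => none
          | d :: _ => some (psychology d) := by
  induction tr generalizing fm with
  | nil => cases fm <;> simp [bLoop, aSevereLoop, psychology]
  | cons hd tl ih =>
    obtain ⟨code, severity⟩ := hd
    simp only [bLoop, aSevereLoop, List.filterMap]
    cases hm : PySem.Dict.get? DISORDER_MAPPING code with
    | none =>
      simp only [Option.isSome_none, Bool.and_false]
      exact ih fm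
    | some d =>
      simp only [Option.isSome_some, Bool.and_true, Option.getD_some]
      by_cases hs : (PySem.Str.lower (PySem.Str.strip severity) == "severe") = true
      · simp [hs]
      · simp only [Bool.not_eq_true] at hs
        simp only [hs, Bool.false_eq_true, if_false]
        cases fm with
        | some x => exact ih (some x)
        | none => exact ih (some d)

theorem main_eq (tr : List (String × String)) :
    department_disorder_from_tests_py tr = department_disorder_from_tests_py_alt tr := by
  unfold department_disorder_from_tests_py department_disorder_from_tests_py_alt
  by_cases h : tr = []
  · simp [h]
  · simp only [h, if_false, bLoop_eq tr none]
    cases aSevereLoop tr with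
    | some r => rfl
    | none =>
      cases tr.filterMap (fun p => PySem.Dict.get? DISORDER_MAPPING p.1) <;> simp [psychology]


-- ===== VERDICT (by name: the statement is the Claim_ definition above) =====
theorem department_disorder_from_tests_py_spec : Claim_equal_department_disorder_from_tests_py := by
  intro tr _
  unfold Spec_department_disorder_from_tests_py
  exact (main_eq tr)
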